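-- pv_equiv track=rewrite | github.com/mraj-556/email-extractor | email-extractor/extract.py | create_port_mapping
-- ===== SOURCE A (Python) =====
-- from typing import List, Dict, Optional
--
-- def normalize_port_name(name: str) -> str:
--     """
--     Normalize a port name for flexible matching.
--     Splits by '/', strips whitespace, sorts alphabetically, and rejoins.
--
--     Example: "Chennai ICD / Bangalore ICD / Hyderabad ICD"
--           -> "BANGALORE ICD|CHENNAI ICD|HYDERABAD ICD"
--     """
--     parts = [p.strip().upper() for p in name.split("/") if p.strip()]
--     parts.sort()
--     return "|".join(parts)
--
-- def create_port_mapping(port_codes_data: List[Dict]) -> tuple[Dict[str, str], Dict[str, str], Dict[str, List[str]], Dict[str, List[str]]]: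
--     """
--     Creates four mappings:
--     1. name_to_code: Exact name -> first code found
--     2. normalized_to_code: Normalized name -> first code found
--     3. name_to_all_codes: Exact name -> list of ALL codes
--     4. normalized_to_all_codes: Normalized name -> list of ALL codes
--
--     The "all_codes" mappings allow country-preference filtering when multiple codes exist.
--     """
--     name_to_code: Dict[str, str] = {}
--     normalized_to_code: Dict[str, str] = {}
--     name_to_all_codes: Dict[str, List[str]] = {}
--     normalized_to_all_codes: Dict[str, List[str]] = {}
--
--     for item in port_codes_data:
--         code = item.get("code", "").strip()
--         name = item.get("name", "").strip()
--
--         if not code or not name: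
--             continue
--
--         upper_name = name.upper()
--         normalized_name = normalize_port_name(name)
--
--         # First occurrence as default
--         if upper_name not in name_to_code:
--             name_to_code[upper_name] = code
--         if normalized_name not in normalized_to_code:
--             normalized_to_code[normalized_name] = code
--
--         # Track ALL codes for each name
--         if upper_name not in name_to_all_codes:
--             name_to_all_codes[upper_name] = []
--         if code not in name_to_all_codes[upper_name]:
--             name_to_all_codes[upper_name].append(code)
--
--         if normalized_name not in normalized_to_all_codes:
--             normalized_to_all_codes[normalized_name] = []
--         if code not in normalized_to_all_codes[normalized_name]:
--             normalized_to_all_codes[normalized_name].append(code)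
--
--     return name_to_code, normalized_to_code, name_to_all_codes, normalized_to_all_codes
-- ===== SOURCE B (Python) =====
-- from typing import List, Dict
--
-- def normalize_port_name(name: str) -> str:
--     parts = [p.strip().upper() for p in name.split("/") if p.strip()]
--     parts.sort()
--     return "|".join(parts)
--
-- def _dedup(xs):
--     """First-seen-order deduplication."""
--     out = []
--     for x in xs:
--         if x not in out:
--             out.append(x)
--     return out
--
-- def _group(keyed):
--     """Group (key, code) pairs into a dict: keys in first-seen order,
--     each mapped to the deduped list of its codes (gathered by a scan per key)."""
--     return {k: _dedup([c for k2, c in keyed if k2 == k])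
--             for k in _dedup([k for k, _ in keyed])}
--
-- def create_port_mapping(port_codes_data: List[Dict]) -> tuple[Dict[str, str], Dict[str, str], Dict[str, List[str]], Dict[str, List[str]]]:
--     # Stage 1: extract the valid (upper name, normalized name, code) triples.
--     triples = []
--     for item in port_codes_data:
--         code = item.get("code", "").strip()
--         name = item.get("name", "").strip()
--         if code and name:
--             triples.append((name.upper(), normalize_port_name(name), code))
--     # Stage 2: group-by on each key projection.
--     name_to_all_codes = _group([(u, c) for u, _, c in triples])
--     normalized_to_all_codes = _group([(n, c) for _, n, c in triples])
--     # Stage 3: the *_to_code dicts are the first code of each group.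
--     name_to_code = {k: v[0] for k, v in name_to_all_codes.items()}
--     normalized_to_code = {k: v[0] for k, v in normalized_to_all_codes.items()}
--     return name_to_code, normalized_to_code, name_to_all_codes, normalized_to_all_codes
-- ===== Notes on version B (the rewrite author's own statement) =====
-- stated objective: alternative
-- what changed: B replaces A's single pass that incrementally maintains four dicts with a staged group-by: extract the valid (name, normalized, code) triples, then build each *_to_all_codes dict as a comprehension over the first-seen-deduplicated keys whose value is a per-key scan of the triples, and derive the *_to_code dicts as the first code of each group.
import Mathlib
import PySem

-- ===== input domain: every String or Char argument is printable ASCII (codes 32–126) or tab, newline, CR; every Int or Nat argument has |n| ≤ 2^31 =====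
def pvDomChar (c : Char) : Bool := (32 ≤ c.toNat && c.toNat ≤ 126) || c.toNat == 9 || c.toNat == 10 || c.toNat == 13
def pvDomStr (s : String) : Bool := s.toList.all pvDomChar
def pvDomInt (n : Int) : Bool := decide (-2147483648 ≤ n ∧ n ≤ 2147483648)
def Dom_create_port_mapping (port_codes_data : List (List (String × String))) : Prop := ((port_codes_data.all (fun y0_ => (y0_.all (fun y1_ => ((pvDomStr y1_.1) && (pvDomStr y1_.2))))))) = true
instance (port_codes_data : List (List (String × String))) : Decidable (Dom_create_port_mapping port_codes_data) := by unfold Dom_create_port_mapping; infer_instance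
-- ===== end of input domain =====

-- B replaces A's single pass maintaining four dicts by a staged group-by: extract valid
-- triples, group each key projection (first-seen keys, per-key scan for codes), derive firsts
-- (objective: alternative decomposition).

-- ===== PORT A =====
-- normalize_port_name (shared verbatim by both Python files)
def pvNormalize (name : String) : String :=
  PySem.Str.join "|"
    (PySem.List.sorted
      (((PySem.Str.split? name "/").getD []).filterMap
        (fun p => if PySem.Str.strip p ≠ "" then some (PySem.Str.upper (PySem.Str.strip p)) else none))
      (fun x => x) false)

-- the body of A's for-loop (state: the four dicts)
def pvStepA
    (st : PySem.Dict String String × PySem.Dict String String ×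
          PySem.Dict String (List String) × PySem.Dict String (List String))
    (item : List (String × String)) :
    PySem.Dict String String × PySem.Dict String String ×
    PySem.Dict String (List String) × PySem.Dict String (List String) :=
  let code := PySem.Str.strip ((PySem.Dict.mk item).getD "code" "")
  let name := PySem.Str.strip ((PySem.Dict.mk item).getD "name" "")
  if code = "" ∨ name = "" then st
  else
    let u := PySem.Str.upper name
    let n := pvNormalize name
    let d1 := if st.1.contains u then st.1 else st.1.insert u code
    let d2 := if st.2.1.contains n then st.2.1 else st.2.1.insert n code
    let d3 := if st.2.2.1.contains u then st.2.2.1 else st.2.2.1.insert u []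
    let d3 := if code ∈ d3.getD u [] then d3 else d3.insert u (d3.getD u [] ++ [code])
    let d4 := if st.2.2.2.contains n then st.2.2.2 else st.2.2.2.insert n []
    let d4 := if code ∈ d4.getD n [] then d4 else d4.insert n (d4.getD n [] ++ [code])
    (d1, d2, d3, d4)

def create_port_mapping (port_codes_data : List (List (String × String))) : (List (String × String)) × (List (String × String)) × (List (String × List String)) × (List (String × List String)) :=
  let st := port_codes_data.foldl pvStepA
    (PySem.Dict.empty, PySem.Dict.empty, PySem.Dict.empty, PySem.Dict.empty)
  (st.1.items, st.2.1.items, st.2.2.1.items, st.2.2.2.items)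

-- ===== PORT B =====
-- _dedup: first-seen-order deduplication by a loop with membership test
def pvDedup {α : Type} [DecidableEq α] (xs : List α) : List α :=
  xs.foldl (fun out x => if x ∈ out then out else out ++ [x]) []

-- _group: {k: _dedup([c for k2, c in keyed if k2 == k]) for k in _dedup([k for k, _ in keyed])}
def pvGroup (keyed : List (String × String)) : List (String × List String) :=
  (pvDedup (keyed.map (fun q => q.1))).map
    (fun k => (k, pvDedup ((keyed.filter (fun q => q.1 == k)).map (fun q => q.2))))

-- Stage 1: the triples loop of B
def pvTripleStep (acc : List (String × String × String)) (item : List (String × String)) :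
    List (String × String × String) :=
  let code := PySem.Str.strip ((PySem.Dict.mk item).getD "code" "")
  let name := PySem.Str.strip ((PySem.Dict.mk item).getD "name" "")
  if code = "" ∨ name = "" then acc
  else acc ++ [(PySem.Str.upper name, pvNormalize name, code)]

def pvTriples (port_codes_data : List (List (String × String))) :
    List (String × String × String) :=
  port_codes_data.foldl pvTripleStep []

-- {k: v[0] for k, v in d.items()}: every grouped value list is nonempty, so v[0] = v.headD ""
def pvFirst (kv : String × List String) : String × String := (kv.1, kv.2.headD "")

def create_port_mapping_alt (port_codes_data : List (List (String × String))) : (List (String × String)) × (List (String × String)) × (List (String × List String)) × (List (String × List String)) :=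
  let ts := pvTriples port_codes_data
  let nameAll := pvGroup (ts.map (fun t => (t.1, t.2.2)))
  let normAll := pvGroup (ts.map (fun t => (t.2.1, t.2.2)))
  (nameAll.map pvFirst, normAll.map pvFirst, nameAll, normAll)

-- ===== PRECONDITION & SPEC =====
def Spec_create_port_mapping (port_codes_data : List (List (String × String))) (out : (List (String × String)) × (List (String × String)) × (List (String × List String)) × (List (String × List String))) : Prop := out = create_port_mapping_alt port_codes_data
instance (port_codes_data : List (List (String × String))) (out : (List (String × String)) × (List (String × String)) × (List (String × List String)) × (List (String × List String))) : Decidable (Spec_create_port_mapping port_codes_data out) := by unfold Spec_create_port_mapping; infer_instance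

-- ===== CLAIM (what is proved, stated in full; the proofs are below) =====
def Claim_equal_create_port_mapping : Prop := ∀ (port_codes_data : List (List (String × String))), Dom_create_port_mapping port_codes_data → Spec_create_port_mapping port_codes_data (create_port_mapping port_codes_data)

-- ===== LEMMAS AND PROOFS =====

-- Proof-side intermediate: the incremental dedup-append update (A's inner logic on one dict)
def pvAddCode (d : PySem.Dict String (List String)) (key code : String) :
    PySem.Dict String (List String) :=
  let d := d.setdefault key []
  let codes := d.getD key []
  if code ∈ codes then d else d.insert key (codes ++ [code])

def pvFoldAdd (d : PySem.Dict String (List String)) (ps : List (String × String)) :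
    PySem.Dict String (List String) :=
  ps.foldl (fun d q => pvAddCode d q.1 q.2) d

-- the two-dict incremental loop (proof-side bridge between A's fold and B's group-by)
def pvStepB
    (st : PySem.Dict String (List String) × PySem.Dict String (List String))
    (item : List (String × String)) :
    PySem.Dict String (List String) × PySem.Dict String (List String) :=
  let code := PySem.Str.strip ((PySem.Dict.mk item).getD "code" "")
  let name := PySem.Str.strip ((PySem.Dict.mk item).getD "name" "")
  if code = "" ∨ name = "" then st
  else (pvAddCode st.1 (PySem.Str.upper name) code,
        pvAddCode st.2 (pvNormalize name) code)

-- Invariant tying A's four-dict state to the bridge's two-dict state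
def pvInv
    (st : PySem.Dict String String × PySem.Dict String String ×
          PySem.Dict String (List String) × PySem.Dict String (List String))
    (tb : PySem.Dict String (List String) × PySem.Dict String (List String)) : Prop :=
  st.1.items = st.2.2.1.items.map pvFirst ∧
  st.2.1.items = st.2.2.2.items.map pvFirst ∧
  (∀ kv ∈ st.2.2.1.items, kv.2 ≠ []) ∧
  (∀ kv ∈ st.2.2.2.items, kv.2 ≠ []) ∧
  st.2.2.1.keys.Nodup ∧ st.2.2.2.keys.Nodup ∧
  st.2.2.1 = tb.1 ∧ st.2.2.2 = tb.2

-- headD of an append with nonempty prefix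
theorem pvHeadD_append {α : Type} (l t : List α) (d : α) (h : l ≠ []) :
    (l ++ t).headD d = l.headD d := by cases l <;> simp_all

-- One dict pair: A's update of (to_code, to_all_codes) vs pvAddCode
theorem pvPair_step
    (d1 : PySem.Dict String String) (d3 : PySem.Dict String (List String))
    (u code : String)
    (hmap : d1.items = d3.items.map pvFirst)
    (hne : ∀ kv ∈ d3.items, kv.2 ≠ [])
    (hnd : d3.keys.Nodup) :
    (if d1.contains u then d1 else d1.insert u code).items
      = (pvAddCode d3 u code).items.map pvFirst ∧
    (∀ kv ∈ (pvAddCode d3 u code).items, kv.2 ≠ []) ∧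
    (pvAddCode d3 u code).keys.Nodup ∧
    pvAddCode d3 u code
      = (if code ∈ (if d3.contains u then d3 else d3.insert u []).getD u []
         then (if d3.contains u then d3 else d3.insert u [])
         else (if d3.contains u then d3 else d3.insert u []).insert u
                ((if d3.contains u then d3 else d3.insert u []).getD u [] ++ [code])) := by
  have hkeys : d1.keys = d3.keys := by
    simp only [PySem.Dict.keys, hmap, List.map_map]; rfl
  have hcont : d1.contains u = d3.contains u := by
    rw [PySem.Dict.contains_eq_decide_mem_keys, PySem.Dict.contains_eq_decide_mem_keys, hkeys]
  by_cases hu : d3.contains u = true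
  · have hA : pvAddCode d3 u code
        = if code ∈ d3.getD u [] then d3 else d3.insert u (d3.getD u [] ++ [code]) := by
      simp [pvAddCode, PySem.Dict.setdefault_of_contains _ _ hu]
    have hchain : (if code ∈ (if d3.contains u then d3 else d3.insert u []).getD u []
         then (if d3.contains u then d3 else d3.insert u [])
         else (if d3.contains u then d3 else d3.insert u []).insert u
                ((if d3.contains u then d3 else d3.insert u []).getD u [] ++ [code]))
        = if code ∈ d3.getD u [] then d3 else d3.insert u (d3.getD u [] ++ [code]) := by
      simp [hu]
    refine ⟨?_, ?_, ?_, hA.trans hchain.symm⟩ <;> rw [hA]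
    · rw [hcont, if_pos hu]
      by_cases hm : code ∈ d3.getD u []
      · rw [if_pos hm]; exact hmap
      · rw [if_neg hm, PySem.Dict.items_insert_of_contains _ _ hu, List.map_map, hmap]
        refine (List.map_congr_left ?_).symm
        intro p hp
        by_cases hpk : p.1 = u
        · have hm2 : (u, p.2) ∈ d3.items := by rw [← hpk]; exact hp
          have hv : d3.getD u [] = p.2 := PySem.Dict.getD_of_mem_items d3 hm2 hnd []
          have hpne : p.2 ≠ [] := hne p hp
          simp only [Function.comp, hpk, beq_self_eq_true, if_true, hv, pvFirst]
          rw [pvHeadD_append _ _ _ hpne]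
        · simp [Function.comp, hpk]
    · intro kv hkv
      by_cases hm : code ∈ d3.getD u []
      · rw [if_pos hm] at hkv; exact hne kv hkv
      · rw [if_neg hm] at hkv
        rcases (PySem.Dict.mem_items_insert _ _ _ _).1 hkv with h | h
        · subst h; simp
        · exact hne kv h.1
    · by_cases hm : code ∈ d3.getD u []
      · rwa [if_pos hm]
      · rw [if_neg hm]; exact PySem.Dict.nodup_keys_insert _ _ _ hnd
  · have hu' : d3.contains u = false := by simpa using hu
    have hA : pvAddCode d3 u code = d3.insert u [code] := by
      simp [pvAddCode, PySem.Dict.setdefault_of_not_contains _ _ hu',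
            PySem.Dict.getD_insert_self, PySem.Dict.insert_insert_self]
    have hB : (if code ∈ (if d3.contains u then d3 else d3.insert u []).getD u []
         then (if d3.contains u then d3 else d3.insert u [])
         else (if d3.contains u then d3 else d3.insert u []).insert u
                ((if d3.contains u then d3 else d3.insert u []).getD u [] ++ [code]))
        = d3.insert u [code] := by
      simp [hu', PySem.Dict.getD_insert_self, PySem.Dict.insert_insert_self]
    have hd1 : d1.contains u = false := hcont.trans hu'
    refine ⟨?_, ?_, ?_, hA.trans hB.symm⟩
    · rw [hA, hd1, if_neg (by simp),
          PySem.Dict.items_insert_of_not_contains _ _ hd1,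
          PySem.Dict.items_insert_of_not_contains _ _ hu']
      simp [hmap, pvFirst]
    · intro kv hkv
      rw [hA] at hkv
      rcases (PySem.Dict.mem_items_insert _ _ _ _).1 hkv with h | h
      · subst h; simp
      · exact hne kv h.1
    · rw [hA]; exact PySem.Dict.nodup_keys_insert _ _ _ hnd

theorem pvStep_inv (st tb item) (h : pvInv st tb) :
    pvInv (pvStepA st item) (pvStepB tb item) := by
  obtain ⟨d1, d2, d3, d4⟩ := st
  obtain ⟨t3, t4⟩ := tb
  obtain ⟨h1, h2, h3, h4, h5, h6, h7, h8⟩ := h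
  dsimp only at h1 h2 h3 h4 h5 h6 h7 h8
  subst h7; subst h8
  simp only [pvStepA, pvStepB]
  by_cases hg : PySem.Str.strip ((PySem.Dict.mk item).getD "code" "") = ""
      ∨ PySem.Str.strip ((PySem.Dict.mk item).getD "name" "") = ""
  · rw [if_pos hg, if_pos hg]
    exact ⟨h1, h2, h3, h4, h5, h6, rfl, rfl⟩
  · rw [if_neg hg, if_neg hg]
    obtain ⟨p1, p2, p3, p4⟩ := pvPair_step d1 d3
      (PySem.Str.upper (PySem.Str.strip ((PySem.Dict.mk item).getD "name" "")))
      (PySem.Str.strip ((PySem.Dict.mk item).getD "code" "")) h1 h3 h5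
    obtain ⟨q1, q2, q3, q4⟩ := pvPair_step d2 d4
      (pvNormalize (PySem.Str.strip ((PySem.Dict.mk item).getD "name" "")))
      (PySem.Str.strip ((PySem.Dict.mk item).getD "code" "")) h2 h4 h6
    exact ⟨by rw [← p4]; exact p1, by rw [← q4]; exact q1,
           by rw [← p4]; exact p2, by rw [← q4]; exact q2,
           by rw [← p4]; exact p3, by rw [← q4]; exact q3,
           p4.symm, q4.symm⟩

theorem pvFold_inv (l : List (List (String × String))) (st tb) (h : pvInv st tb) :
    pvInv (l.foldl pvStepA st) (l.foldl pvStepB tb) := by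
  induction l generalizing st tb with
  | nil => exact h
  | cons x xs ih => exact ih _ _ (pvStep_inv st tb x h)

-- ---- dedup facts ----
theorem pvDedup_foldl_mem {α : Type} [DecidableEq α] (l acc : List α) (x : α) :
    x ∈ l.foldl (fun out y => if y ∈ out then out else out ++ [y]) acc ↔ x ∈ acc ∨ x ∈ l := by
  induction l generalizing acc with
  | nil => simp
  | cons a l ih =>
    simp only [List.foldl_cons, ih, List.mem_cons]
    by_cases h : a ∈ acc
    · simp only [if_pos h]
      by_cases hxa : x = a
      · subst hxa; simp [h]
      · simp [hxa]
    · simp only [if_neg h, List.mem_append, List.mem_singleton]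
      tauto

theorem pvMem_dedup {α : Type} [DecidableEq α] (l : List α) (x : α) :
    x ∈ pvDedup l ↔ x ∈ l := by
  simp [pvDedup, pvDedup_foldl_mem]

theorem pvDedup_foldl_nodup {α : Type} [DecidableEq α] (l acc : List α) (h : acc.Nodup) :
    (l.foldl (fun out y => if y ∈ out then out else out ++ [y]) acc).Nodup := by
  induction l generalizing acc with
  | nil => exact h
  | cons a l ih =>
    simp only [List.foldl_cons]
    by_cases ha : a ∈ acc
    · rw [if_pos ha]; exact ih _ h
    · rw [if_neg ha]
      refine ih _ ?_
      rw [List.nodup_append]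
      refine ⟨h, List.nodup_singleton a, ?_⟩
      intro b hb b2 hb2
      rw [List.mem_singleton] at hb2
      subst hb2
      exact fun e => ha (e ▸ hb)

theorem pvNodup_dedup {α : Type} [DecidableEq α] (l : List α) : (pvDedup l).Nodup :=
  pvDedup_foldl_nodup l [] List.nodup_nil

theorem pvDedup_append {α : Type} [DecidableEq α] (l : List α) (x : α) :
    pvDedup (l ++ [x]) = if x ∈ l then pvDedup l else pvDedup l ++ [x] := by
  rw [pvDedup, List.foldl_append]
  show (if x ∈ pvDedup l then pvDedup l else pvDedup l ++ [x]) = _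
  simp only [pvMem_dedup]

-- ---- group facts ----
theorem pvFilter_eq_nil (keyed : List (String × String)) (k : String)
    (h : k ∉ keyed.map (fun q => q.1)) :
    keyed.filter (fun q => q.1 == k) = [] := by
  rw [List.filter_eq_nil_iff]
  intro q hq hk
  exact h (List.mem_map.2 ⟨q, hq, by simpa using hk⟩)

theorem pvGroup_mem_eq (keyed : List (String × String)) (kv : String × List String)
    (h : kv ∈ pvGroup keyed) :
    kv.2 = pvDedup ((keyed.filter (fun q => q.1 == kv.1)).map (fun q => q.2)) ∧
    kv.1 ∈ keyed.map (fun q => q.1) := by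
  obtain ⟨k, hk, rfl⟩ := List.mem_map.1 h
  exact ⟨rfl, (pvMem_dedup _ _).1 hk⟩

theorem pvGroup_keys (keyed : List (String × String)) :
    (pvGroup keyed).map (fun p => p.1) = pvDedup (keyed.map (fun q => q.1)) := by
  simp [pvGroup, List.map_map, Function.comp_def]

theorem pvGroup_append_mem (keyed : List (String × String)) (k c : String)
    (h : k ∈ keyed.map (fun q => q.1)) :
    pvGroup (keyed ++ [(k, c)])
      = (pvGroup keyed).map
          (fun kv => if kv.1 == k then (kv.1, if c ∈ kv.2 then kv.2 else kv.2 ++ [c]) else kv) := by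
  unfold pvGroup
  simp only [List.map_append, List.map_cons, List.map_nil]
  rw [pvDedup_append _ k, if_pos (by simpa using h), List.map_map]
  refine List.map_congr_left ?_
  intro k' hk'
  simp only [Function.comp]
  rw [List.filter_append]
  by_cases hkk : k' = k
  · subst hkk
    have : ([(k', c)].filter (fun q => q.1 == k')) = [(k', c)] := by simp
    rw [this]
    simp only [List.map_append, List.map_cons, List.map_nil]
    rw [pvDedup_append]
    simp only [beq_self_eq_true, if_true]
    by_cases hm : c ∈ (keyed.filter (fun q => q.1 == k')).map (fun q => q.2) <;>
      simp [hm, pvMem_dedup]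
  · have : ([(k, c)].filter (fun q => q.1 == k')) = [] := by
      simp [show ¬ (k = k') from fun e => hkk e.symm]
    rw [this, List.append_nil]
    simp [show (k' == k) = false by simpa using hkk]

theorem pvGroup_append_not_mem (keyed : List (String × String)) (k c : String)
    (h : k ∉ keyed.map (fun q => q.1)) :
    pvGroup (keyed ++ [(k, c)]) = pvGroup keyed ++ [(k, [c])] := by
  unfold pvGroup
  simp only [List.map_append, List.map_cons, List.map_nil]
  rw [pvDedup_append _ k, if_neg (by simpa using h), List.map_append]
  congr 1
  · refine List.map_congr_left ?_
    intro k' hk'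
    have hk'mem : k' ∈ keyed.map (fun q => q.1) := (pvMem_dedup _ _).1 hk'
    have hkk : ¬ (k = k') := fun e => h (e ▸ hk'mem)
    rw [List.filter_append]
    have : ([(k, c)].filter (fun q => q.1 == k')) = [] := by simp [hkk]
    rw [this, List.append_nil]
  · simp only [List.map_cons, List.map_nil]
    rw [List.filter_append, pvFilter_eq_nil keyed k h]
    simp [pvDedup]

-- ---- the incremental addCode fold computes the group-by ----
theorem pvFoldAdd_items (ps : List (String × String)) :
    (pvFoldAdd PySem.Dict.empty ps).items = pvGroup ps := by
  induction ps using List.reverseRecOn with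
  | nil => simp [pvFoldAdd, pvGroup, pvDedup, PySem.Dict.empty]
  | append_singleton l q ih =>
    obtain ⟨k, c⟩ := q
    have hfold : pvFoldAdd PySem.Dict.empty (l ++ [(k, c)])
        = pvAddCode (pvFoldAdd PySem.Dict.empty l) k c := by
      simp [pvFoldAdd, List.foldl_append]
    set d := pvFoldAdd PySem.Dict.empty l with hd
    have hkeys : d.keys = pvDedup (l.map (fun q => q.1)) := by
      show d.items.map (fun p => p.1) = _
      rw [ih, pvGroup_keys]
    have hnd : d.keys.Nodup := by rw [hkeys]; exact pvNodup_dedup _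
    rw [hfold]
    by_cases hk : k ∈ l.map (fun q => q.1)
    · -- key already present
      have hcont : d.contains k = true := by
        rw [PySem.Dict.contains_eq_decide_mem_keys, hkeys]
        simp [pvMem_dedup, hk]
      have hmemit : (k, pvDedup ((l.filter (fun q => q.1 == k)).map (fun q => q.2))) ∈ d.items := by
        rw [ih]
        exact List.mem_map.2 ⟨k, (pvMem_dedup _ _).2 hk, rfl⟩
      set V := pvDedup ((l.filter (fun q => q.1 == k)).map (fun q => q.2)) with hV
      have hgetD : d.getD k [] = V := PySem.Dict.getD_of_mem_items d hmemit hnd []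
      have hA : pvAddCode d k c = if c ∈ V then d else d.insert k (V ++ [c]) := by
        simp [pvAddCode, PySem.Dict.setdefault_of_contains _ _ hcont, hgetD]
      rw [hA, pvGroup_append_mem l k c hk]
      by_cases hc : c ∈ V
      · rw [if_pos hc, ih]
        refine Eq.symm ((List.map_congr_left ?_).trans (List.map_id _))
        rintro ⟨k1, v1⟩ hkv
        by_cases hkvk : k1 = k
        · have hvv : v1 = V := by
            have := (pvGroup_mem_eq l (k1, v1) hkv).1
            simpa [hV, hkvk] using this
          simp [hkvk, hvv, hc]
        · simp [hkvk]
      · rw [if_neg hc, PySem.Dict.items_insert_of_contains _ _ hcont, ih]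
        refine List.map_congr_left ?_
        rintro ⟨k1, v1⟩ hkv
        by_cases hkvk : k1 = k
        · have hvv : v1 = V := by
            have := (pvGroup_mem_eq l (k1, v1) hkv).1
            simpa [hV, hkvk] using this
          simp [hkvk, hvv, hc]
        · simp [hkvk]
    · -- new key
      have hcont : d.contains k = false := by
        rw [PySem.Dict.contains_eq_decide_mem_keys, hkeys]
        simp [pvMem_dedup, hk]
      have hA : pvAddCode d k c = d.insert k [c] := by
        simp [pvAddCode, PySem.Dict.setdefault_of_not_contains _ _ hcont,
              PySem.Dict.getD_insert_self, PySem.Dict.insert_insert_self]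
      rw [hA, PySem.Dict.items_insert_of_not_contains _ _ hcont, ih,
          pvGroup_append_not_mem l k c hk]

-- ---- the triples loop and the bridge two-dict loop ----
theorem pvTripleStep_acc (l : List (List (String × String)))
    (acc : List (String × String × String)) :
    l.foldl pvTripleStep acc = acc ++ l.foldl pvTripleStep [] := by
  induction l generalizing acc with
  | nil => simp
  | cons x xs ih =>
    simp only [List.foldl_cons]
    rw [ih (pvTripleStep acc x), ih (pvTripleStep [] x)]
    have : pvTripleStep acc x = acc ++ pvTripleStep [] x := by
      simp only [pvTripleStep]
      split <;> simp
    rw [this, List.append_assoc]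

theorem pvStepB_fold (data : List (List (String × String)))
    (t1 t2 : PySem.Dict String (List String)) :
    data.foldl pvStepB (t1, t2)
      = (pvFoldAdd t1 ((pvTriples data).map (fun t => (t.1, t.2.2))),
         pvFoldAdd t2 ((pvTriples data).map (fun t => (t.2.1, t.2.2)))) := by
  induction data generalizing t1 t2 with
  | nil => simp [pvTriples, pvFoldAdd]
  | cons x xs ih =>
    have hts : pvTriples (x :: xs) = pvTripleStep [] x ++ pvTriples xs := by
      simp only [pvTriples, List.foldl_cons]
      exact pvTripleStep_acc xs (pvTripleStep [] x)
    simp only [List.foldl_cons]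
    rw [ih (pvStepB (t1, t2) x).1 (pvStepB (t1, t2) x).2, hts]
    simp only [List.map_append, pvFoldAdd, List.foldl_append]
    simp only [pvStepB, pvTripleStep]
    split
    · simp
    · simp

-- ===== VERDICT (by name: the statement is the Claim_ definition above) =====
theorem create_port_mapping_spec : Claim_equal_create_port_mapping := by
  intro pcd _
  have h := pvFold_inv pcd (PySem.Dict.empty, PySem.Dict.empty, PySem.Dict.empty, PySem.Dict.empty)
    (PySem.Dict.empty, PySem.Dict.empty) (by simp [pvInv, PySem.Dict.empty])
  obtain ⟨h1, h2, -, -, -, -, h3, h4⟩ := h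
  have hb := pvStepB_fold pcd PySem.Dict.empty PySem.Dict.empty
  have e1 : (pcd.foldl pvStepB (PySem.Dict.empty, PySem.Dict.empty)).1.items
      = pvGroup ((pvTriples pcd).map (fun t => (t.1, t.2.2))) := by
    rw [hb]; exact pvFoldAdd_items _
  have e2 : (pcd.foldl pvStepB (PySem.Dict.empty, PySem.Dict.empty)).2.items
      = pvGroup ((pvTriples pcd).map (fun t => (t.2.1, t.2.2))) := by
    rw [hb]; exact pvFoldAdd_items _
  show _ = create_port_mapping_alt pcd
  simp only [create_port_mapping, create_port_mapping_alt]
  rw [h1, h2, h3, h4, e1, e2]
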